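-- pv_equiv track=rewrite | github.com/alexbabkin/yalgorithms | task4.py | get_one_length
-- ===== SOURCE A (Python) =====
-- def get_one_length(lst):
--     one_length = 0
--     lengths = []
--     for elem in lst + [0]:
--         if elem == 1:
--             one_length += 1
--         else:
--             lengths.append(one_length)
--             one_length = 0
--     return lengths
-- ===== SOURCE B (Python) =====
-- def get_one_length(lst):
--     arr = lst + [0]
--     seps = [i for i, x in enumerate(arr) if x != 1]
--     res = []
--     prev = -1
--     for p in seps:
--         res.append(p - prev - 1)
--         prev = p
--     return res
-- ===== Notes on version B (the rewrite author's own statement) =====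
-- stated objective: alternative
-- what changed: B derives each 1-run length as the gap between consecutive non-1 positions (separator-index list built once, then a gap scan), instead of A's element-by-element counter.
import Mathlib
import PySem

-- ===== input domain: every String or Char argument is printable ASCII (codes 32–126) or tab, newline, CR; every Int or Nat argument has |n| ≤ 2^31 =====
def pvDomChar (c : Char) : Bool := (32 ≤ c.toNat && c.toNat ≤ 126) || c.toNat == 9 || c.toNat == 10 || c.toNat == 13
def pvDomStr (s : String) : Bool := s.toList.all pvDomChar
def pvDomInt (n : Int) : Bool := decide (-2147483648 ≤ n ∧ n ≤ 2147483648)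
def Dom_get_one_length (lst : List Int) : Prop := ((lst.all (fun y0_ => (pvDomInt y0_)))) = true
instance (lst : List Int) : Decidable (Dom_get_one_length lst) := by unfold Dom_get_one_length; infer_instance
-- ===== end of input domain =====

-- B computes each 1-run length as the gap between consecutive non-1 positions instead of A's running counter.

-- ===== PORT A =====
-- the for-loop over lst + [0] with state (one_length, lengths)
def pvALoop (c : Int) (lengths : List Int) : List Int → List Int
  | [] => lengths
  | x :: t => if x = 1 then pvALoop (c + 1) lengths t else pvALoop 0 (lengths ++ [c]) t

def get_one_length (lst : List Int) : List Int := pvALoop 0 [] (lst ++ [0])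

-- ===== PORT B =====
-- the for-loop over seps with state (prev, res)
def pvBLoop (prev : Int) (res : List Int) : List Int → List Int
  | [] => res
  | p :: t => pvBLoop p (res ++ [p - prev - 1]) t

def get_one_length_alt (lst : List Int) : List Int :=
  let arr := lst ++ [0]
  let seps := ((PySem.List.enumerate arr).filter (fun px => px.2 ≠ 1)).map (fun px => px.1)
  pvBLoop (-1) [] seps

-- ===== PRECONDITION & SPEC =====
def Spec_get_one_length (lst : List Int) (out : List Int) : Prop := out = get_one_length_alt lst
instance (lst : List Int) (out : List Int) : Decidable (Spec_get_one_length lst out) := by unfold Spec_get_one_length; infer_instance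

-- ===== CLAIM (what is proved, stated in full; the proofs are below) =====
def Claim_equal_get_one_length : Prop := ∀ (lst : List Int), Dom_get_one_length lst → Spec_get_one_length lst (get_one_length lst)

-- ===== LEMMAS AND PROOFS =====
theorem pv_key (xs : List Int) : ∀ (i c : Int) (acc : List Int),
    pvALoop c acc xs =
      pvBLoop (i - c - 1) acc
        (((PySem.List.enumerate xs i).filter (fun px => px.2 ≠ 1)).map (fun px => px.1)) := by
  induction xs with
  | nil => intro i c acc; simp [pvALoop, pvBLoop, PySem.List.enumerate_nil]
  | cons x t ih =>
    intro i c acc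
    rw [PySem.List.enumerate_cons, List.filter_cons]
    by_cases hx : x = 1
    · rw [if_neg (by simp [hx])]
      simp only [pvALoop, if_pos hx]
      rw [ih (i + 1) (c + 1) acc]
      congr 1; ring
    · rw [if_pos (by simp [hx])]
      simp only [pvALoop, if_neg hx, List.map_cons, pvBLoop]
      have hc : i - (i - c - 1) - 1 = c := by ring
      rw [hc, ih (i + 1) 0 (acc ++ [c])]
      congr 1; ring

-- ===== VERDICT (by name: the statement is the Claim_ definition above) =====
theorem get_one_length_spec : Claim_equal_get_one_length := by
  intro lst _
  show get_one_length lst = get_one_length_alt lst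
  unfold get_one_length get_one_length_alt
  have := pv_key (lst ++ [0]) 0 0 []
  simpa using this
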